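-- pv_equiv track=rewrite | github.com/jialiangding/testcase-manager2 | backend/ai_test_cases/src/agents/requirement_analyst.py | _is_valid_json_format
-- ===== SOURCE A (Python) =====
-- def _is_valid_json_format(json_str: str) -> bool:
--     """验证字符串是否具有基本的JSON格式"""
--     try:
--         # 检查基本结构
--         json_str = json_str.strip()
--         if not (json_str.startswith('{') and json_str.endswith('}')):
--             return False
--
--         # 检查是否包含必要的引号
--         if '"' not in json_str:
--             return False
--
--         # 检查大括号是否平衡
--         brace_count = 0
--         for char in json_str:
--             if char == '{':
--                 brace_count += 1
--             elif char == '}':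
--                 brace_count -= 1
--             if brace_count < 0:
--                 return False
--
--         return brace_count == 0
--     except Exception:
--         return False
-- ===== SOURCE B (Python) =====
-- def _cancel_pass(braces):
--     """One left-to-right pass deleting non-overlapping adjacent '{}' pairs."""
--     out = []
--     i = 0
--     while i < len(braces):
--         if braces[i] == '{' and i + 1 < len(braces) and braces[i + 1] == '}':
--             i += 2
--         else:
--             out.append(braces[i])
--             i += 1
--     return ''.join(out)
--
--
-- def _is_valid_json_format(json_str: str) -> bool:
--     """Rewriting approach: keep only braces, cancel adjacent '{}' pairs to a fixpoint;
--     the word is well-balanced iff the fixpoint is empty."""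
--     try:
--         s = json_str.strip()
--         if not (s.startswith('{') and s.endswith('}') and '"' in s):
--             return False
--         braces = ''.join(c for c in s if c == '{' or c == '}')
--         while True:
--             reduced = _cancel_pass(braces)
--             if reduced == braces:
--                 break
--             braces = reduced
--         return braces == ''
--     except Exception:
--         return False
-- ===== Notes on version B (the rewrite author's own statement) =====
-- stated objective: alternative
-- what changed: Replaces A's single-pass signed brace counter with early negative exit by a rewriting algorithm: filter the string down to its braces, then repeatedly cancel adjacent open-close brace pairs until a fixpoint, accepting iff the fixpoint is empty (the Dyck word criterion).
import Mathlib
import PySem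

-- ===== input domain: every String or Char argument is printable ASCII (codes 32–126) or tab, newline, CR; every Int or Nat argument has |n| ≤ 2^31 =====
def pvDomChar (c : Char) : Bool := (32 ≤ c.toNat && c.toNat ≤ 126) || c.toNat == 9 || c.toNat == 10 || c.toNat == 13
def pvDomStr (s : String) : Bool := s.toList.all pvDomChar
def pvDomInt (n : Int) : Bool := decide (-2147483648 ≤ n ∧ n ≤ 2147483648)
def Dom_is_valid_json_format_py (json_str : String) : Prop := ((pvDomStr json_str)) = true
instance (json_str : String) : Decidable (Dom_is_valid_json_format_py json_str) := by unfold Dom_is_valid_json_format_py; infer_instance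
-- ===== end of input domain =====

-- B replaces A's single-pass signed brace counter by a rewriting algorithm: keep only the
-- braces and cancel adjacent open-close brace pairs until a fixpoint; valid iff the fixpoint is empty.
-- Return-value equivalence only; neither program mutates its argument.

-- ===== PORT A =====
-- the for-loop over the stripped string, carrying brace_count; early 'return False' when it goes negative
def pvA_loop (cs : List Char) (braceCount : Int) : Bool :=
  match cs with
  | [] => braceCount == 0
  | c :: rest =>
    let braceCount := if c == '{' then braceCount + 1
                      else if c == '}' then braceCount - 1
                      else braceCount
    if braceCount < 0 then false else pvA_loop rest braceCount

def is_valid_json_format_py (json_str : String) : Bool :=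
  -- the try/except is vacuous: no statement in the body can raise
  let s := PySem.Str.strip json_str
  if !(PySem.Str.startswith s "{" && PySem.Str.endswith s "}") then false
  else if !(PySem.Str.isIn "\"" s) then false
  else pvA_loop s.toList 0

-- ===== PORT B =====
-- Source B's _cancel_pass: one left-to-right pass deleting non-overlapping adjacent '{}' pairs
def pvCancelPass : List Char → List Char
  | [] => []
  | [c] => [c]
  | c1 :: c2 :: rest =>
    if c1 == '{' && c2 == '}' then pvCancelPass rest
    else c1 :: pvCancelPass (c2 :: rest)
termination_by b => b.length
decreasing_by all_goals (simp; try omega)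

-- termination fact the port's while-loop needs: a cancel pass only deletes characters
theorem pvCancelPass_sublist (b : List Char) : (pvCancelPass b).Sublist b := by
  induction b using pvCancelPass.induct with
  | case1 => simp [pvCancelPass]
  | case2 c => simp [pvCancelPass]
  | case3 c1 c2 rest h ih =>
    simp only [pvCancelPass, h, if_true]
    exact ih.trans (List.sublist_cons_self c2 rest |>.trans (List.sublist_cons_self c1 _))
  | case4 c1 c2 rest h ih =>
    simp only [pvCancelPass, h, if_false, Bool.false_eq_true]
    exact ih.cons₂ c1

-- Source B's 'while True: reduced = _cancel_pass(braces); if reduced == braces: break; braces = reduced'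
def pvB_while (b : List Char) : List Char :=
  let r := pvCancelPass b
  if r = b then b else pvB_while r
termination_by b.length
decreasing_by
  rename_i h
  have hs := pvCancelPass_sublist b
  rcases lt_or_eq_of_le hs.length_le with hlt | heq
  · exact hlt
  · exact absurd (hs.eq_of_length heq) h

def is_valid_json_format_py_alt (json_str : String) : Bool :=
  let s := PySem.Str.strip json_str
  if !(PySem.Str.startswith s "{" && PySem.Str.endswith s "}" && PySem.Str.isIn "\"" s) then false
  else
    let braces := s.toList.filter (fun c => c == '{' || c == '}')
    pvB_while braces == []

-- ===== PRECONDITION & SPEC =====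
def Spec_is_valid_json_format_py (json_str : String) (out : Bool) : Prop := out = is_valid_json_format_py_alt json_str
instance (json_str : String) (out : Bool) : Decidable (Spec_is_valid_json_format_py json_str out) := by unfold Spec_is_valid_json_format_py; infer_instance

-- ===== CLAIM (what is proved, stated in full; the proofs are below) =====
def Claim_equal_is_valid_json_format_py : Prop := ∀ (json_str : String), Dom_is_valid_json_format_py json_str → Spec_is_valid_json_format_py json_str (is_valid_json_format_py json_str)

-- ===== LEMMAS AND PROOFS =====

def pvStep (c : Char) (k : Int) : Int :=
  if c == '{' then k + 1 else if c == '}' then k - 1 else k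

theorem pvA_loop_cons (c : Char) (rest : List Char) (k : Int) :
    pvA_loop (c :: rest) k = if pvStep c k < 0 then false else pvA_loop rest (pvStep c k) := rfl

theorem pvStep_ge (c : Char) (k : Int) (h : ¬ pvStep c k < 0) : 0 ≤ pvStep c k := by
  omega

-- non-brace characters never change A's counter (which is ≥ 0 throughout)
theorem pvA_loop_filter (b : List Char) : ∀ k : Int, 0 ≤ k →
    pvA_loop b k = pvA_loop (b.filter (fun c => c == '{' || c == '}')) k := by
  induction b with
  | nil => intro k _; rfl
  | cons c rest ih =>
    intro k hk
    by_cases hbr : (c == '{' || c == '}') = true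
    · rw [show List.filter (fun c => c == '{' || c == '}') (c :: rest)
          = c :: List.filter (fun c => c == '{' || c == '}') rest by simp [hbr]]
      rw [pvA_loop_cons c rest k,
        pvA_loop_cons c (List.filter (fun c => c == '{' || c == '}') rest) k]
      by_cases hneg : pvStep c k < 0
      · simp [hneg]
      · simp only [hneg, if_false]
        exact ih (pvStep c k) (by omega)
    · have hstep : pvStep c k = k := by
        simp only [Bool.or_eq_true, not_or] at hbr
        simp [pvStep, hbr.1, hbr.2]
      rw [show List.filter (fun c => c == '{' || c == '}') (c :: rest)
          = List.filter (fun c => c == '{' || c == '}') rest by simp [hbr]]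
      rw [pvA_loop_cons c rest k, hstep, if_neg (by omega : ¬ (k : Int) < 0)]
      exact ih k hk

-- cancelling adjacent '{}' pairs preserves A's verdict (for a non-negative counter)
theorem pvCancelPass_invar (b : List Char) : ∀ k : Int, 0 ≤ k →
    pvA_loop b k = pvA_loop (pvCancelPass b) k := by
  induction b using pvCancelPass.induct with
  | case1 => intro k _; simp [pvCancelPass]
  | case2 c => intro k _; simp [pvCancelPass]
  | case3 c1 c2 rest h ih =>
    intro k hk
    obtain ⟨h1, h2⟩ : c1 = '{' ∧ c2 = '}' := by simpa using h
    subst h1; subst h2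
    rw [show pvCancelPass ('{' :: '}' :: rest) = pvCancelPass rest by simp [pvCancelPass]]
    have e1 : pvStep '{' k = k + 1 := by simp [pvStep]
    have e2 : pvStep '}' (k + 1) = k := by simp [pvStep]
    rw [pvA_loop_cons '{' ('}' :: rest) k, e1, if_neg (by omega : ¬ (k + 1 : Int) < 0),
      pvA_loop_cons '}' rest (k + 1), e2, if_neg (by omega : ¬ (k : Int) < 0)]
    exact ih k hk
  | case4 c1 c2 rest h ih =>
    intro k hk
    rw [show pvCancelPass (c1 :: c2 :: rest) = c1 :: pvCancelPass (c2 :: rest) by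
      simp [pvCancelPass, h]]
    rw [pvA_loop_cons c1 (c2 :: rest) k, pvA_loop_cons c1 (pvCancelPass (c2 :: rest)) k]
    by_cases hneg : pvStep c1 k < 0
    · simp [hneg]
    · simp only [hneg, if_false]
      exact ih (pvStep c1 k) (pvStep_ge c1 k hneg)

theorem pvB_while_eq (b : List Char) :
    pvB_while b = if pvCancelPass b = b then b else pvB_while (pvCancelPass b) := by
  rw [pvB_while]

theorem pvB_while_invar (b : List Char) : pvA_loop b 0 = pvA_loop (pvB_while b) 0 := by
  induction b using pvB_while.induct with
  | case1 b r hfix =>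
    rw [pvB_while_eq, if_pos (show pvCancelPass b = b from hfix)]
  | case2 b r hne ih =>
    rw [pvB_while_eq, if_neg (show ¬ pvCancelPass b = b from hne),
      pvCancelPass_invar b 0 (le_refl 0)]
    exact ih

theorem pvB_while_fix (b : List Char) : pvCancelPass (pvB_while b) = pvB_while b := by
  induction b using pvB_while.induct with
  | case1 b r hfix =>
    rw [pvB_while_eq, if_pos (show pvCancelPass b = b from hfix)]
    exact hfix
  | case2 b r hne ih =>
    rw [pvB_while_eq, if_neg (show ¬ pvCancelPass b = b from hne)]
    exact ih

theorem pvB_while_sublist (b : List Char) : (pvB_while b).Sublist b := by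
  induction b using pvB_while.induct with
  | case1 b r hfix => rw [pvB_while_eq, if_pos (show pvCancelPass b = b from hfix)]
  | case2 b r hne ih =>
    rw [pvB_while_eq, if_neg (show ¬ pvCancelPass b = b from hne)]
    exact ih.trans (pvCancelPass_sublist b)

-- a brace-only fixpoint beginning with '{' consists of '{' only
theorem pvAllOpen (rest : List Char) :
    (∀ c ∈ rest, c = '{' ∨ c = '}') →
    pvCancelPass ('{' :: rest) = '{' :: rest → ∀ c ∈ rest, c = '{' := by
  induction rest with
  | nil => intro _ _ c hc; cases hc
  | cons x r ih =>
    intro hall hfix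
    by_cases hx : x = '}'
    · exfalso
      rw [show pvCancelPass ('{' :: x :: r) = pvCancelPass r by simp [pvCancelPass, hx]] at hfix
      have hlen := congrArg List.length hfix
      have hle := (pvCancelPass_sublist r).length_le
      simp at hlen; omega
    · have hx1 : x = '{' := by
        rcases hall x (List.mem_cons_self ..) with h | h
        · exact h
        · exact absurd h hx
      rw [show pvCancelPass ('{' :: x :: r) = '{' :: pvCancelPass (x :: r) by
        simp [pvCancelPass, hx1]] at hfix
      have hfix' : pvCancelPass ('{' :: r) = '{' :: r := by
        have := (List.cons.injEq _ _ _ _ ▸ hfix).2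
        rwa [hx1] at this
      have hall' : ∀ c ∈ r, c = '{' ∨ c = '}' := fun c hc => hall c (List.mem_cons_of_mem x hc)
      intro c hc
      rcases List.mem_cons.mp hc with h | h
      · rw [h, hx1]
      · exact ih hall' hfix' c h

-- a nonempty run of '{' starting from a positive counter is rejected
theorem pvOpenFalse (rest : List Char) : ∀ k : Int, 1 ≤ k →
    (∀ c ∈ rest, c = '{') → pvA_loop rest k = false := by
  induction rest with
  | nil =>
    intro k hk _
    simp [pvA_loop]
    omega
  | cons c r ih =>
    intro k hk hall
    have hc : c = '{' := hall c (List.mem_cons_self ..)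
    rw [pvA_loop_cons, show pvStep c k = k + 1 by simp [pvStep, hc],
      if_neg (by omega : ¬ (k + 1 : Int) < 0)]
    exact ih (k + 1) (by omega) (fun x hx => hall x (List.mem_cons_of_mem c hx))

-- on a brace-only fixpoint, A's verdict is exactly 'the word is empty'
theorem pvFixVerdict (b : List Char) :
    (∀ c ∈ b, c = '{' ∨ c = '}') →
    pvCancelPass b = b → pvA_loop b 0 = (b == []) := by
  intro hall hfix
  match b with
  | [] => rfl
  | c :: rest =>
    rcases hall c (List.mem_cons_self ..) with h1 | h1
    · subst h1
      rw [pvA_loop_cons, show pvStep '{' 0 = 1 by simp [pvStep],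
        if_neg (by omega : ¬ (1 : Int) < 0)]
      rw [pvOpenFalse rest 1 (le_refl 1)
        (pvAllOpen rest (fun x hx => hall x (List.mem_cons_of_mem _ hx)) hfix)]
      simp
    · subst h1
      rw [pvA_loop_cons, show pvStep '}' 0 = -1 by simp [pvStep], if_pos (by omega)]
      simp

theorem pvMain (b : List Char) :
    pvA_loop b 0 = (pvB_while (b.filter (fun c => c == '{' || c == '}')) == []) := by
  have hall : ∀ c ∈ b.filter (fun c => c == '{' || c == '}'), c = '{' ∨ c = '}' := by
    intro c hc
    have := (List.mem_filter.mp hc).2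
    simpa using this
  have hall2 : ∀ c ∈ pvB_while (b.filter (fun c => c == '{' || c == '}')), c = '{' ∨ c = '}' :=
    fun c hc => hall c ((pvB_while_sublist _).mem hc)
  rw [pvA_loop_filter b 0 (le_refl 0),
    pvB_while_invar (b.filter (fun c => c == '{' || c == '}')),
    pvFixVerdict _ hall2 (pvB_while_fix _)]

-- ===== VERDICT (by name: the statement is the Claim_ definition above) =====
theorem is_valid_json_format_py_spec : Claim_equal_is_valid_json_format_py := by
  intro json_str _
  unfold Spec_is_valid_json_format_py is_valid_json_format_py is_valid_json_format_py_alt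
  simp only [pvMain, Bool.and_assoc]
  cases PySem.Str.startswith (PySem.Str.strip json_str) "{" <;>
    cases PySem.Str.endswith (PySem.Str.strip json_str) "}" <;>
      cases PySem.Str.isIn "\"" (PySem.Str.strip json_str) <;> simp
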